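-- pv_equiv track=rewrite | github.com/hyeon-jeong/coding_study | 공통문제/week_20/미현.py | div_conq
-- ===== SOURCE A (Python) =====
-- def div_conq(c):
--     max_index = 0
--     max_cost = c[0]
--     for i in range(len(c)):
--         if c[i] >= max_cost:
--             max_index = i
--             max_cost = c[i]
--     if max_index == len(c)-1:
--         return (c[-1]*len(c)-sum(c))
--     else:
--         return (c[max_index]*(max_index)-sum(c[:max_index])) + div_conq(c[max_index+1:])
-- ===== SOURCE B (Python) =====
-- def div_conq(c):
--     m = c[-1]
--     total = 0
--     for x in reversed(c):
--         if x > m: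
--             m = x
--         total += m - x
--     return total
-- ===== Notes on version B (the rewrite author's own statement) =====
-- stated objective: faster
-- what changed: Replaced A's recursive split-at-last-argmax (a full scan per recursion level, quadratic on decreasing inputs) by a single backward pass that keeps the running suffix maximum and accumulates (suffixMax - x).
import Mathlib
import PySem

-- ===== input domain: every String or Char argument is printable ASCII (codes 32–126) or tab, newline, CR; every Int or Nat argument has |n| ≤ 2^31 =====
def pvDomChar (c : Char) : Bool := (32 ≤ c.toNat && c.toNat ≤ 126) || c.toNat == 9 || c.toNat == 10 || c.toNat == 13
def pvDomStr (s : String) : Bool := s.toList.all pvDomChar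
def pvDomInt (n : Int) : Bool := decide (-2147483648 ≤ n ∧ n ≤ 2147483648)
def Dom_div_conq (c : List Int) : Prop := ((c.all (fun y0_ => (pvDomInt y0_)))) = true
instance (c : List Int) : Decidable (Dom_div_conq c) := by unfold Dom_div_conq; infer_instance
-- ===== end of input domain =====

-- B replaces A's recursive split at the last argmax (quadratic worst case) by one
-- backward pass tracking the running suffix maximum (linear); equal on all nonempty lists.

-- ===== PORT A =====
-- A's recursion always shrinks its argument; the fuel counter (length + 1, proved
-- sufficient below) only makes the literal transcription total.
def div_conqF : Nat → List Int → Int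
  | 0, _ => 0
  | fuel+1, c =>
    -- max_index = 0; max_cost = c[0]; for i in range(len(c)): if c[i] >= max_cost: ...
    let st := (PySem.List.pyRange 0 (c.length : Int) 1).foldl
      (fun (st : Int × Int) i =>
        if PySem.List.pyGetD c i 0 ≥ st.2 then (i, PySem.List.pyGetD c i 0) else st)
      (0, PySem.List.pyGetD c 0 0)
    if st.1 = (c.length : Int) - 1 then
      PySem.List.pyGetD c (-1) 0 * (c.length : Int) - c.sum
    else
      (PySem.List.pyGetD c st.1 0 * st.1 - (PySem.List.slice c none (some st.1)).sum)
        + div_conqF fuel (PySem.List.slice c (some (st.1 + 1)) none)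

def div_conq (c : List Int) : Int := div_conqF (c.length + 1) c

-- ===== PORT B =====
def div_conq_alt (c : List Int) : Int :=
  (c.reverse.foldl
    (fun (st : Int × Int) x =>
      let m := if x > st.1 then x else st.1
      (m, st.2 + (m - x)))
    (PySem.List.pyGetD c (-1) 0, 0)).2

-- ===== PRECONDITION & SPEC =====
-- Python A raises IndexError on [] (c[0]); B raises there too (c[-1]).
def Pre_div_conq (c : List Int) : Prop := c ≠ []
instance (c : List Int) : Decidable (Pre_div_conq c) := by unfold Pre_div_conq; infer_instance
def pvWitness_div_conq : List Int := [2, 1, 3, 1]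

def Spec_div_conq (c : List Int) (out : Int) : Prop := out = div_conq_alt c
instance (c : List Int) (out : Int) : Decidable (Spec_div_conq c out) := by unfold Spec_div_conq; infer_instance

-- ===== CLAIM (what is proved, stated in full; the proofs are below) =====
def Claim_equal_div_conq : Prop := ∀ (c : List Int), Dom_div_conq c → Pre_div_conq c → Spec_div_conq c (div_conq c)

-- ===== LEMMAS AND PROOFS =====

-- max of a nonempty list (head-seeded running max)
def Mx : List Int → Int
  | [] => 0
  | x :: xs => xs.foldl max x

-- the specification value: sum over positions of (suffix maximum - element)
def S : List Int → Int
  | [] => 0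
  | x :: xs => (Mx (x :: xs) - x) + S xs

-- structural image of A's argmax loop
def argLoop : List Int → Int → Int × Int → Int × Int
  | [], _, st => st
  | v :: vs, i, st => argLoop vs (i + 1) (if v ≥ st.2 then (i, v) else st)

lemma bridgeA (c : List Int) : ∀ (xs : List Int) (n : Nat) (st : Int × Int),
    xs = c.drop n →
    (PySem.List.pyRange (n : Int) (c.length : Int) 1).foldl
      (fun (st : Int × Int) i =>
        if PySem.List.pyGetD c i 0 ≥ st.2 then (i, PySem.List.pyGetD c i 0) else st) st
    = argLoop xs (n : Int) st := by
  intro xs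
  induction xs with
  | nil =>
      intro n st h
      have hn : c.length ≤ n := by
        by_contra hlt
        push Not at hlt
        have := List.drop_eq_nil_iff.mp h.symm
        omega
      rw [PySem.List.pyRange_one_eq_nil (by exact_mod_cast hn)]
      rfl
  | cons v vs ih =>
      intro n st h
      have hn : n < c.length := by
        by_contra hlt
        push Not at hlt
        rw [List.drop_eq_nil_iff.mpr hlt] at h
        simp at h
      rw [PySem.List.pyRange_one_cons (by exact_mod_cast hn)]
      have hv : PySem.List.pyGetD c (n : Int) 0 = v := by
        have h0 : (c.drop n)[0]? = some v := by rw [← h]; rfl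
        rw [List.getElem?_drop] at h0
        simp only [PySem.List.pyGetD_natCast, List.getD, Nat.add_zero] at *
        simp [h0]
      have hvs : vs = c.drop (n + 1) := by
        rw [List.drop_add_one_eq_tail_drop, ← h]; rfl
      simp only [List.foldl_cons, hv]
      have := ih (n + 1) (if v ≥ st.2 then ((n : Int), v) else st) hvs
      push_cast at this ⊢
      rw [this]
      rfl

lemma argLoop_spec : ∀ (xs : List Int) (i k0 m0 : Int),
    (argLoop xs i (k0, m0)).2 = xs.foldl max m0 ∧
    ((argLoop xs i (k0, m0)) = (k0, m0) ∧ (∀ y ∈ xs, y < m0) ∨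
      ∃ p t, xs = p ++ (argLoop xs i (k0, m0)).2 :: t ∧
        (argLoop xs i (k0, m0)).1 = i + p.length ∧
        ∀ y ∈ t, y < (argLoop xs i (k0, m0)).2) := by
  intro xs
  induction xs with
  | nil =>
      intro i k0 m0
      exact ⟨rfl, Or.inl ⟨rfl, by simp⟩⟩
  | cons v vs ih =>
      intro i k0 m0
      by_cases hv : v ≥ m0
      · have hstep : argLoop (v :: vs) i (k0, m0) = argLoop vs (i + 1) (i, v) := by
          simp [argLoop, hv]
        have hmax : max m0 v = v := max_eq_right hv
        obtain ⟨h2, hcase⟩ := ih (i + 1) i v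
        refine ⟨by rw [hstep, h2]; simp [hmax], ?_⟩
        rcases hcase with ⟨heq, hall⟩ | ⟨p, t, hsplit, hk, ht⟩
        · right
          refine ⟨[], vs, ?_, ?_, ?_⟩
          · rw [hstep, heq]; rfl
          · rw [hstep, heq]; simp
          · rw [hstep, heq]; exact hall
        · right
          refine ⟨v :: p, t, ?_, ?_, ?_⟩
          · rw [hstep, List.cons_append]
            exact congrArg (v :: ·) hsplit
          · rw [hstep, hk]; push_cast [List.length_cons]; ring
          · rw [hstep]; exact ht
      · have hstep : argLoop (v :: vs) i (k0, m0) = argLoop vs (i + 1) (k0, m0) := by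
          simp [argLoop, hv]
        have hmax : max m0 v = m0 := max_eq_left (le_of_lt (lt_of_not_ge hv))
        obtain ⟨h2, hcase⟩ := ih (i + 1) k0 m0
        refine ⟨by rw [hstep, h2]; simp [hmax], ?_⟩
        rcases hcase with ⟨heq, hall⟩ | ⟨p, t, hsplit, hk, ht⟩
        · left
          refine ⟨by rw [hstep, heq], ?_⟩
          intro y hy
          rcases List.mem_cons.mp hy with rfl | hy
          · exact lt_of_not_ge hv
          · exact hall y hy
        · right
          refine ⟨v :: p, t, ?_, ?_, ?_⟩
          · rw [hstep, List.cons_append]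
            exact congrArg (v :: ·) hsplit
          · rw [hstep, hk]; push_cast [List.length_cons]; ring
          · rw [hstep]; exact ht

lemma foldl_max_le {t : List Int} {a m : Int} (ha : a ≤ m) (h : ∀ y ∈ t, y ≤ m) :
    t.foldl max a ≤ m := by
  induction t generalizing a with
  | nil => exact ha
  | cons y ys ih =>
      exact ih (max_le ha (h y (by simp))) (fun z hz => h z (by simp [hz]))

lemma foldl_max_eq_of_le {t : List Int} {m : Int} (h : ∀ y ∈ t, y ≤ m) :
    t.foldl max m = m :=
  le_antisymm (foldl_max_le le_rfl h) (PySem.List.le_foldl_max t m).1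

lemma S_split (p : List Int) (m : Int) (t : List Int)
    (hp : ∀ y ∈ p, y ≤ m) (ht : ∀ y ∈ t, y ≤ m) :
    S (p ++ m :: t) = m * p.length - p.sum + S t := by
  induction p with
  | nil =>
      simp only [List.nil_append, S, Mx, foldl_max_eq_of_le ht, List.length_nil, List.sum_nil]
      ring
  | cons a p ih =>
      have ha : a ≤ m := hp a (by simp)
      have hp' : ∀ y ∈ p, y ≤ m := fun y hy => hp y (by simp [hy])
      have hMx : Mx (a :: (p ++ m :: t)) = m := by
        simp only [Mx, List.foldl_append, List.foldl_cons]
        have h1 : (p.foldl max a) ≤ m := foldl_max_le ha hp'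
        rw [max_eq_right h1]
        exact foldl_max_eq_of_le ht
      have : S (a :: (p ++ m :: t)) = (m - a) + S (p ++ m :: t) := by
        simp only [S] at *
        rw [hMx]
      rw [List.cons_append] at *
      rw [this, ih hp']
      push_cast [List.length_cons, List.sum_cons]
      ring

lemma A_eq_S : ∀ (fuel : Nat) (c : List Int), c.length < fuel → c ≠ [] →
    div_conqF fuel c = S c := by
  intro fuel
  induction fuel with
  | zero => intro c h _; omega
  | succ fu ih =>
      intro c hlen hne
      obtain ⟨x, r, rfl⟩ := List.exists_cons_of_ne_nil hne
      simp only [div_conqF]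
      have hinit : ((0 : Int), PySem.List.pyGetD (x :: r) 0 0) = ((0 : Int), x) := by
        simp [PySem.List.pyGetD_zero_cons]
      have hb := bridgeA (x :: r) (x :: r) 0 ((0 : Int), x) (by simp)
      push_cast at hb
      rw [hinit, hb]
      obtain ⟨h2, hcase⟩ := argLoop_spec (x :: r) 0 0 x
      set res := argLoop (x :: r) (0 : Int) (0, x) with hres
      have hle : ∀ y ∈ x :: r, y ≤ res.2 := by
        intro y hy
        rw [h2]
        simp only [List.foldl_cons, max_self]
        rcases List.mem_cons.mp hy with rfl | hy
        · exact (PySem.List.le_foldl_max r y).1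
        · exact (PySem.List.le_foldl_max r x).2 y hy
      rcases hcase with ⟨_, hall⟩ | ⟨p, t, hsplit, hk, ht⟩
      · exact absurd (hall x (by simp)) (lt_irrefl x)
      · have hk' : res.1 = (p.length : Int) := by rw [hk]; ring
        have hp : ∀ y ∈ p, y ≤ res.2 := fun y hy => hle y (by rw [hsplit]; simp [hy])
        have ht' : ∀ y ∈ t, y ≤ res.2 := fun y hy => le_of_lt (ht y hy)
        have hlenc : (x :: r).length = p.length + t.length + 1 := by
          rw [hsplit]; simp; omega
        by_cases hT : t = []
        · subst hT
          rw [if_pos (by rw [hk', hlenc]; push_cast; simp)]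
          rw [hsplit, PySem.List.pyGetD_neg_one_append_singleton]
          rw [S_split p res.2 [] hp ht']
          simp only [S, List.sum_append, List.sum_cons, List.sum_nil, List.length_append,
            List.length_cons, List.length_nil]
          push_cast
          ring
        · rw [if_neg (by
            rw [hk', hlenc]
            have : t.length ≠ 0 := fun h => hT (List.eq_nil_of_length_eq_zero h)
            push_cast
            omega)]
          rw [hk']
          have hget : PySem.List.pyGetD (x :: r) ((p.length : Nat) : Int) 0 = res.2 := by
            rw [PySem.List.pyGetD_natCast, hsplit]
            simp [List.getD_eq_getElem?_getD]
          have htake : PySem.List.slice (x :: r) none (some ((p.length : Nat) : Int)) = p := by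
            rw [PySem.List.slice_to_natCast, hsplit, List.take_left]
          have hdrop : PySem.List.slice (x :: r) (some (((p.length : Nat) : Int) + 1)) none = t := by
            rw [show ((p.length : Nat) : Int) + 1 = ((p.length + 1 : Nat) : Int) by push_cast; ring]
            rw [PySem.List.slice_from_natCast, hsplit, List.append_cons]
            rw [List.drop_left' (by simp)]
          rw [hget, htake, hdrop]
          have htfuel : t.length < fu := by omega
          rw [ih t htfuel hT]
          rw [hsplit, S_split p res.2 t hp ht']

lemma foldl_max_comm (l : List Int) : ∀ a b : Int, l.foldl max (max a b) = max a (l.foldl max b) := by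
  induction l with
  | nil => intro a b; rfl
  | cons y ys ih =>
      intro a b
      simp only [List.foldl_cons, max_assoc, ih]

lemma B_eq : ∀ (xs : List Int) (m0 : Int), xs.getLast? = some m0 →
    xs.reverse.foldl
      (fun (st : Int × Int) x =>
        let m := if x > st.1 then x else st.1
        (m, st.2 + (m - x))) (m0, 0) = (Mx xs, S xs) := by
  intro xs
  induction xs with
  | nil => intro m0 h; simp at h
  | cons x xs ih =>
      intro m0 h
      cases xs with
      | nil =>
          simp only [List.getLast?_singleton, Option.some.injEq] at h
          subst h
          simp [Mx, S]
      | cons y ys =>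
          have hlast : (y :: ys).getLast? = some m0 := by
            rw [← h]; exact List.getLast?_cons_cons.symm
          have ihy := ih m0 hlast
          rw [List.reverse_cons, List.foldl_append, ihy]
          simp only [List.foldl_cons, List.foldl_nil]
          have hmax : (if x > Mx (y :: ys) then x else Mx (y :: ys)) = max x (Mx (y :: ys)) := by
            rcases le_or_gt x (Mx (y :: ys)) with hle | hlt
            · rw [if_neg (not_lt.mpr hle), max_eq_right hle]
            · rw [if_pos hlt, max_eq_left (le_of_lt hlt)]
          have hMx : Mx (x :: y :: ys) = max x (Mx (y :: ys)) := by
            simp only [Mx, List.foldl_cons]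
            rw [show max x y = max x (max x y) by rw [← max_assoc, max_self]]
            rw [show (max x y) = max x y from rfl]
            have := foldl_max_comm ys x y
            simpa using this
          simp only [hmax]
          refine Prod.ext hMx.symm ?_
          simp only [S, hMx]
          ring

-- ===== VERDICT (by name: the statement is the Claim_ definition above) =====
theorem div_conq_spec : Claim_equal_div_conq := by
  intro c _ hpre
  have hne : c ≠ [] := hpre
  unfold Spec_div_conq
  have hA : div_conq c = S c := A_eq_S (c.length + 1) c (by omega) hne
  have hlast : c.getLast? = some (c.getLast hne) := List.getLast?_eq_some_getLast hne
  have hB : div_conq_alt c = S c := by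
    unfold div_conq_alt
    rw [PySem.List.pyGetD_neg_one c 0 hne, B_eq c (c.getLast hne) hlast]
  rw [hA, hB]
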